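-- pv_equiv track=rewrite | github.com/loudsheep/matura | informatyka/czerwiec2021/zad4/rozw.py | check_for_palindrome
-- ===== SOURCE A (Python) =====
-- def check_for_palindrome(string):
--     chars = "QWERTYUIOPLKJHGFDSAZXCVBNM1234567890"
--
--     for c in chars:
--         tmp = string + c
--         if tmp[::-1] == tmp:
--             return tmp
--
--     for c in chars:
--         tmp = c + string
--         if tmp[::-1] == tmp:
--             return tmp
--
--     return None
-- ===== SOURCE B (Python) =====
-- def check_for_palindrome(string):
--     chars = "QWERTYUIOPLKJHGFDSAZXCVBNM1234567890"
--     if not string: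
--         return chars[0]
--     c = string[0]
--     if c in chars:
--         t = string + c
--         if t == t[::-1]:
--             return t
--     c = string[-1]
--     if c in chars:
--         t = c + string
--         if t == t[::-1]:
--             return t
--     return None
-- ===== Notes on version B (the rewrite author's own statement) =====
-- stated objective: faster
-- what changed: Instead of scanning all 36 candidate characters with two loops, B derives the only possible candidate per side (appended char must equal string[0], prepended char must equal string[-1]) and does at most two palindrome checks; the empty string returns chars[0] directly.
import Mathlib
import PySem

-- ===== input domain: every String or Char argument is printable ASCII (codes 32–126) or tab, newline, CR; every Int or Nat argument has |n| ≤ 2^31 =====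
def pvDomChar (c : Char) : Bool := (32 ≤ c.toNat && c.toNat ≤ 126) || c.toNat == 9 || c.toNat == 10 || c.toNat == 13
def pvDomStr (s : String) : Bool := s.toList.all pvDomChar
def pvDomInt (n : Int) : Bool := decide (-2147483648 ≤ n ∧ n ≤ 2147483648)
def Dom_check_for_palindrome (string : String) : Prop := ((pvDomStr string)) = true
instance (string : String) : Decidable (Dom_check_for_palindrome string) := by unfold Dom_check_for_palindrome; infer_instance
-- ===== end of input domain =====

-- B replaces A's two 36-candidate scans by at most two palindrome checks: only string[0]
-- can make string+c a palindrome and only string[-1] can make c+string one (faster, constant factor).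

-- the candidate alphabet both programs use
def pvChars : List Char := "QWERTYUIOPLKJHGFDSAZXCVBNM1234567890".toList

-- ===== PORT A =====
-- first loop of A: try string + c for each candidate c, return the first palindrome
def pvLoopApp (s : List Char) : List Char → Option (List Char)
  | [] => none
  | c :: cs =>
      let tmp := s ++ [c]
      if tmp.reverse = tmp then some tmp else pvLoopApp s cs

-- second loop of A: try c + string for each candidate c
def pvLoopPre (s : List Char) : List Char → Option (List Char)
  | [] => none
  | c :: cs =>
      let tmp := c :: s
      if tmp.reverse = tmp then some tmp else pvLoopPre s cs

-- A's body on the character list: first loop, then second loop, else None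
def pvACore (s : List Char) : Option (List Char) :=
  match pvLoopApp s pvChars with
  | some t => some t
  | none =>
    match pvLoopPre s pvChars with
    | some t => some t
    | none => none

def check_for_palindrome (string : String) : Option String :=
  (pvACore string.toList).map String.ofList

-- ===== PORT B =====
-- B's body: empty string → "Q"; else try the only two possible candidates
def pvBCore : List Char → Option (List Char)
  | [] => some ['Q']
  | c0 :: rest =>
      if c0 ∈ pvChars ∧ ((c0 :: rest) ++ [c0]).reverse = (c0 :: rest) ++ [c0] then
        some ((c0 :: rest) ++ [c0])
      else if rest.getLastD c0 ∈ pvChars ∧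
          (rest.getLastD c0 :: c0 :: rest).reverse = rest.getLastD c0 :: c0 :: rest then
        some (rest.getLastD c0 :: c0 :: rest)
      else none

def check_for_palindrome_alt (string : String) : Option String :=
  (pvBCore string.toList).map String.ofList

-- ===== PRECONDITION & SPEC =====
def Spec_check_for_palindrome (string : String) (out : Option String) : Prop := out = check_for_palindrome_alt string
instance (string : String) (out : Option String) : Decidable (Spec_check_for_palindrome string out) := by unfold Spec_check_for_palindrome; infer_instance

-- ===== CLAIM (what is proved, stated in full; the proofs are below) =====
def Claim_equal_check_for_palindrome : Prop := ∀ (string : String), Dom_check_for_palindrome string → Spec_check_for_palindrome string (check_for_palindrome string)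

-- ===== LEMMAS AND PROOFS =====

lemma pvLoopApp_cons (s : List Char) (c : Char) (cs : List Char) :
    pvLoopApp s (c :: cs) =
      if (s ++ [c]).reverse = s ++ [c] then some (s ++ [c]) else pvLoopApp s cs := rfl

lemma pvLoopPre_cons (s : List Char) (c : Char) (cs : List Char) :
    pvLoopPre s (c :: cs) =
      if (c :: s).reverse = c :: s then some (c :: s) else pvLoopPre s cs := rfl

-- only c = head can make s ++ [c] a palindrome (s nonempty)
lemma pv_pal_app (a c : Char) (t : List Char)
    (h : ((a :: t) ++ [c]).reverse = (a :: t) ++ [c]) : c = a := by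
  have h' := congrArg List.head? h
  simpa using h'

-- only c = last can make c :: s a palindrome (s nonempty)
lemma pv_pal_pre (c a : Char) (t : List Char)
    (h : (c :: (a :: t)).reverse = c :: (a :: t)) : c = t.getLastD a := by
  have h' := congrArg List.getLast? h
  rw [List.getLast?_reverse] at h'
  rw [List.getLastD_eq_getLast?]
  simpa [List.getLast?_cons] using h'

-- characterization of A's first loop on a nonempty string
lemma pv_loopApp_eq (a : Char) (t : List Char) (cs : List Char) :
    pvLoopApp (a :: t) cs =
      if a ∈ cs ∧ ((a :: t) ++ [a]).reverse = (a :: t) ++ [a]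
      then some ((a :: t) ++ [a]) else none := by
  induction cs with
  | nil =>
    rw [if_neg]
    · rfl
    · rintro ⟨hm, -⟩; exact absurd hm (List.not_mem_nil)
  | cons c cs ih =>
    rw [pvLoopApp_cons]
    by_cases hpal : ((a :: t) ++ [c]).reverse = (a :: t) ++ [c]
    · have hc : c = a := pv_pal_app a c t hpal
      subst hc
      rw [if_pos hpal, if_pos ⟨List.mem_cons_self, hpal⟩]
    · rw [if_neg hpal, ih]
      refine if_congr ?_ rfl rfl
      constructor
      · rintro ⟨hm, hp⟩; exact ⟨List.mem_cons_of_mem _ hm, hp⟩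
      · rintro ⟨hm, hp⟩
        rcases List.mem_cons.mp hm with hac | hm'
        · exact absurd hp (hac ▸ hpal)
        · exact ⟨hm', hp⟩

-- characterization of A's second loop on a nonempty string
lemma pv_loopPre_eq (a : Char) (t : List Char) (cs : List Char) :
    pvLoopPre (a :: t) cs =
      if t.getLastD a ∈ cs ∧ (t.getLastD a :: a :: t).reverse = t.getLastD a :: a :: t
      then some (t.getLastD a :: a :: t) else none := by
  induction cs with
  | nil =>
    rw [if_neg]
    · rfl
    · rintro ⟨hm, -⟩; exact absurd hm (List.not_mem_nil)
  | cons c cs ih =>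
    rw [pvLoopPre_cons]
    by_cases hpal : (c :: a :: t).reverse = c :: a :: t
    · have hc : c = t.getLastD a := pv_pal_pre c a t hpal
      subst hc
      rw [if_pos hpal, if_pos ⟨List.mem_cons_self, hpal⟩]
    · rw [if_neg hpal, ih]
      refine if_congr ?_ rfl rfl
      constructor
      · rintro ⟨hm, hp⟩; exact ⟨List.mem_cons_of_mem _ hm, hp⟩
      · rintro ⟨hm, hp⟩
        rcases List.mem_cons.mp hm with hac | hm'
        · exact absurd hp (hac ▸ hpal)
        · exact ⟨hm', hp⟩

lemma pvBCore_cons (c0 : Char) (rest : List Char) :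
    pvBCore (c0 :: rest) =
      if c0 ∈ pvChars ∧ ((c0 :: rest) ++ [c0]).reverse = (c0 :: rest) ++ [c0] then
        some ((c0 :: rest) ++ [c0])
      else if rest.getLastD c0 ∈ pvChars ∧
          (rest.getLastD c0 :: c0 :: rest).reverse = rest.getLastD c0 :: c0 :: rest then
        some (rest.getLastD c0 :: c0 :: rest)
      else none := rfl

lemma pv_core_eq (s : List Char) : pvACore s = pvBCore s := by
  cases s with
  | nil => decide
  | cons a t =>
    unfold pvACore
    rw [pvBCore_cons, pv_loopApp_eq]
    by_cases h1 : a ∈ pvChars ∧ ((a :: t) ++ [a]).reverse = (a :: t) ++ [a]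
    · rw [if_pos h1]
      exact (if_pos h1).symm
    · rw [if_neg h1, pv_loopPre_eq]
      by_cases h2 : t.getLastD a ∈ pvChars ∧
          (t.getLastD a :: a :: t).reverse = t.getLastD a :: a :: t
      · rw [if_pos h2]
        exact (if_neg h1).symm
      · rw [if_neg h2]
        exact (if_neg h1).symm

-- ===== VERDICT (by name: the statement is the Claim_ definition above) =====
theorem check_for_palindrome_spec : Claim_equal_check_for_palindrome := by
  intro string _
  show check_for_palindrome string = check_for_palindrome_alt string
  unfold check_for_palindrome check_for_palindrome_alt
  rw [pv_core_eq]
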